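-- pv_equiv track=rewrite | github.com/vitalvightz/unlxck-gpt-webhook | tools/plan_quality_gate.py | _phase_ranges
-- ===== SOURCE A (Python) =====
-- PHASE_HEADERS = [
--     "## PHASE 1:",
--     "## PHASE 2:",
--     "## PHASE 3:",
-- ]
--
-- def _phase_ranges(lines: list[str]) -> dict[str, tuple[int, int]]:
--     indices: list[tuple[str, int]] = []
--     for idx, line in enumerate(lines):
--         for header in PHASE_HEADERS:
--             if line.startswith(header):
--                 indices.append((header, idx))
--                 break
--     indices.sort(key=lambda x: x[1])
--     ranges: dict[str, tuple[int, int]] = {}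
--     for i, (header, start_idx) in enumerate(indices):
--         end_idx = indices[i + 1][1] if i + 1 < len(indices) else len(lines)
--         ranges[header] = (start_idx, end_idx)
--     return ranges
-- ===== SOURCE B (Python) =====
-- PHASE_HEADERS = [
--     "## PHASE 1:",
--     "## PHASE 2:",
--     "## PHASE 3:",
-- ]
--
-- def _phase_ranges(lines: list[str]) -> dict[str, tuple[int, int]]:
--     # One forward pass: close the previous header's range each time a new header line is found.
--     ranges: dict[str, tuple[int, int]] = {}
--     prev = None  # (header, start_idx) of the most recent header line
--     for idx, line in enumerate(lines):
--         header = next((h for h in PHASE_HEADERS if line.startswith(h)), None)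
--         if header is not None:
--             if prev is not None:
--                 ranges[prev[0]] = (prev[1], idx)
--             prev = (header, idx)
--     if prev is not None:
--         ranges[prev[0]] = (prev[1], len(lines))
--     return ranges
-- ===== Notes on version B (the rewrite author's own statement) =====
-- stated objective: simpler
-- what changed: Replaces A's three-phase build-list + sort + index-lookahead pass with a single forward pass that keeps the most recent header line and closes its range when the next header (or end of input) is reached.
import Mathlib
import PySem

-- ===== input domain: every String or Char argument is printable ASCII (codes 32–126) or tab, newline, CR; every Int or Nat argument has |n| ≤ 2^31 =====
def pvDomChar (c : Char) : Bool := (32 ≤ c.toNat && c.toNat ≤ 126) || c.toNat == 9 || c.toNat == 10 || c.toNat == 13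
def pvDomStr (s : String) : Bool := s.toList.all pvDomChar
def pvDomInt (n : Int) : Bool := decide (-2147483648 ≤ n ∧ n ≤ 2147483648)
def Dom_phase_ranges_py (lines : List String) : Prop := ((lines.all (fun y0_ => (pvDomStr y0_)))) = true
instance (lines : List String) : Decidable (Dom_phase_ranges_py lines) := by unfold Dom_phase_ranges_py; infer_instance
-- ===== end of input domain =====

-- B replaces A's build-list + sort + index-lookahead pass with a single forward pass that
-- closes the previous header's range when the next header line is found (objective: simpler).

-- PHASE_HEADERS
def pvHeaders : List String := ["## PHASE 1:", "## PHASE 2:", "## PHASE 3:"]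

-- ===== PORT A =====
-- inner 'for header in PHASE_HEADERS: if line.startswith(header): …; break' = first matching header
def phase_ranges_py (lines : List String) : List (String × Int × Int) :=
  let indices : List (String × Int) :=
    (PySem.List.enumerate lines).foldl (fun acc p =>
      match pvHeaders.find? (fun h => PySem.Str.startswith p.2 h) with
      | some h => acc ++ [(h, p.1)]
      | none => acc) []
  let indices := PySem.List.sorted indices (fun x => x.2) false
  let ranges : PySem.Dict String (Int × Int) :=
    (PySem.List.enumerate indices).foldl (fun d q =>
      d.insert q.2.1 (q.2.2,
        match PySem.List.pyGet? indices (q.1 + 1) with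
        | some nxt => nxt.2
        | none => (lines.length : Int))) PySem.Dict.empty
  ranges.items

-- ===== PORT B =====
-- one forward pass; state = (ranges dict, most recent header line or none)
def phase_ranges_py_alt (lines : List String) : List (String × Int × Int) :=
  let st :=
    (PySem.List.enumerate lines).foldl
      (fun (st : PySem.Dict String (Int × Int) × Option (String × Int)) p =>
        match pvHeaders.find? (fun h => PySem.Str.startswith p.2 h) with
        | some h =>
          match st.2 with
          | some pv => (st.1.insert pv.1 (pv.2, p.1), some (h, p.1))
          | none => (st.1, some (h, p.1))
        | none => st)
      (PySem.Dict.empty, none)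
  match st.2 with
  | some pv => (st.1.insert pv.1 (pv.2, (lines.length : Int))).items
  | none => st.1.items

-- ===== PRECONDITION & SPEC =====
def Spec_phase_ranges_py (lines : List String) (out : List (String × Int × Int)) : Prop := out = phase_ranges_py_alt lines
instance (lines : List String) (out : List (String × Int × Int)) : Decidable (Spec_phase_ranges_py lines out) := by unfold Spec_phase_ranges_py; infer_instance

-- ===== CLAIM (what is proved, stated in full; the proofs are below) =====
def Claim_equal_phase_ranges_py : Prop := ∀ (lines : List String), Dom_phase_ranges_py lines → Spec_phase_ranges_py lines (phase_ranges_py lines)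

-- ===== LEMMAS AND PROOFS =====

-- the (header, idx) pairs of the matched lines, in index order
def pvMatches (lines : List String) (s : Int) : List (String × Int) :=
  match lines with
  | [] => []
  | l :: ls =>
    match pvHeaders.find? (fun h => PySem.Str.startswith l h) with
    | some h => (h, s) :: pvMatches ls (s + 1)
    | none => pvMatches ls (s + 1)

-- common target: insert each matched header with its range, left to right
def pvIns (L : Int) (d : PySem.Dict String (Int × Int)) : List (String × Int) → PySem.Dict String (Int × Int)
  | [] => d
  | [(h, i)] => d.insert h (i, L)
  | (h, i) :: (h', i') :: rest => pvIns L (d.insert h (i, i')) ((h', i') :: rest)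

theorem pvMatches_snd_ge (lines : List String) (s : Int) :
    ∀ p ∈ pvMatches lines s, s ≤ p.2 := by
  induction lines generalizing s with
  | nil => simp [pvMatches]
  | cons l ls ih =>
    intro p hp
    unfold pvMatches at hp
    cases hf : pvHeaders.find? (fun h => PySem.Str.startswith l h) with
    | some h =>
      rw [hf] at hp
      rcases List.mem_cons.mp hp with rfl | hp
      · exact le_refl _
      · have := ih (s + 1) p hp; omega
    | none =>
      rw [hf] at hp
      have := ih (s + 1) p hp; omega

theorem pvMatches_pairwise (lines : List String) (s : Int) :
    (pvMatches lines s).Pairwise (fun a b => a.2 < b.2) := by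
  induction lines generalizing s with
  | nil => simp [pvMatches]
  | cons l ls ih =>
    unfold pvMatches
    cases pvHeaders.find? (fun h => PySem.Str.startswith l h) with
    | some h =>
      refine List.Pairwise.cons ?_ (ih (s + 1))
      intro p hp
      have := pvMatches_snd_ge ls (s + 1) p hp
      simp; omega
    | none => exact ih (s + 1)

-- A's first loop builds exactly pvMatches
theorem pvA_first (lines : List String) (s : Int) (acc : List (String × Int)) :
    (PySem.List.enumerate lines s).foldl (fun acc p =>
      match pvHeaders.find? (fun h => PySem.Str.startswith p.2 h) with
      | some h => acc ++ [(h, p.1)]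
      | none => acc) acc = acc ++ pvMatches lines s := by
  induction lines generalizing s acc with
  | nil => simp [PySem.List.enumerate_nil, pvMatches]
  | cons l ls ih =>
    rw [PySem.List.enumerate_cons]
    unfold pvMatches
    cases hf : pvHeaders.find? (fun h => PySem.Str.startswith l h) with
    | some h => simp only [List.foldl_cons, hf, ih]; simp
    | none => simp only [List.foldl_cons, hf, ih]

-- A's second loop equals pvIns (generalized over the already-consumed prefix)
theorem pvA_second (L : Int) (rest pre : List (String × Int))
    (d : PySem.Dict String (Int × Int)) :
    (PySem.List.enumerate rest (pre.length : Int)).foldl (fun d q =>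
      d.insert q.2.1 (q.2.2,
        match PySem.List.pyGet? (pre ++ rest) (q.1 + 1) with
        | some nxt => nxt.2
        | none => L)) d = pvIns L d rest := by
  induction rest generalizing pre d with
  | nil => simp [PySem.List.enumerate_nil, pvIns]
  | cons m rest' ih =>
    rw [PySem.List.enumerate_cons, List.foldl_cons]
    have hidx : ((pre.length : Int) + 1) = (((pre ++ [m]).length : Nat) : Int) := by
      simp
    have hget : PySem.List.pyGet? (pre ++ m :: rest') ((pre.length : Int) + 1)
        = rest'[0]? := by
      rw [hidx, PySem.List.pyGet?_natCast]
      rw [show pre ++ m :: rest' = (pre ++ [m]) ++ rest' by simp]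
      rw [List.getElem?_append_right (by simp)]
      simp
    rw [hget]
    rw [show pre ++ m :: rest' = (pre ++ [m]) ++ rest' by simp, hidx, ih (pre ++ [m])]
    cases rest' <;> simp [pvIns]

-- proof-side: B's per-match step
def pvCStep (st : PySem.Dict String (Int × Int) × Option (String × Int)) (q : String × Int) :
    PySem.Dict String (Int × Int) × Option (String × Int) :=
  match st.2 with
  | some pv => (st.1.insert pv.1 (pv.2, q.2), some q)
  | none => (st.1, some q)

-- B's fold over the lines equals a fold over the matched pairs
theorem pvB_fold (lines : List String) (s : Int)
    (st : PySem.Dict String (Int × Int) × Option (String × Int)) :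
    (PySem.List.enumerate lines s).foldl
      (fun (st : PySem.Dict String (Int × Int) × Option (String × Int)) p =>
        match pvHeaders.find? (fun h => PySem.Str.startswith p.2 h) with
        | some h =>
          match st.2 with
          | some pv => (st.1.insert pv.1 (pv.2, p.1), some (h, p.1))
          | none => (st.1, some (h, p.1))
        | none => st) st
    = (pvMatches lines s).foldl pvCStep st := by
  induction lines generalizing s st with
  | nil => simp [PySem.List.enumerate_nil, pvMatches]
  | cons l ls ih =>
    rw [PySem.List.enumerate_cons, List.foldl_cons]
    unfold pvMatches
    cases hf : pvHeaders.find? (fun h => PySem.Str.startswith l h) with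
    | some h =>
      simp only [List.foldl_cons]
      obtain ⟨d0, p0⟩ := st
      cases p0 <;> exact ih (s + 1) _
    | none => exact ih (s + 1) st

-- finishing B's fold from a live 'prev' gives pvIns with prev prepended
theorem pvB_finish (L : Int) (ms : List (String × Int)) (d : PySem.Dict String (Int × Int))
    (pv : String × Int) :
    (match (ms.foldl pvCStep (d, some pv)).2 with
      | some pv' => (ms.foldl pvCStep (d, some pv)).1.insert pv'.1 (pv'.2, L)
      | none => (ms.foldl pvCStep (d, some pv)).1)
    = pvIns L d (pv :: ms) := by
  induction ms generalizing d pv with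
  | nil => simp [pvIns]
  | cons q rest ih =>
    simp only [List.foldl_cons]
    exact (ih (d.insert pv.1 (pv.2, q.2)) q).trans (by cases rest <;> simp [pvIns])

-- ===== VERDICT (by name: the statement is the Claim_ definition above) =====
theorem phase_ranges_py_spec : Claim_equal_phase_ranges_py := by
  intro lines _
  unfold Spec_phase_ranges_py
  simp only [phase_ranges_py, phase_ranges_py_alt]
  have hms : PySem.List.sorted (pvMatches lines 0) (fun x => x.2) false = pvMatches lines 0 :=
    PySem.List.sorted_eq_of_perm_of_pairwise_lt _ _ (fun x : String × Int => x.2) (List.Perm.refl _) (pvMatches_pairwise lines 0)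
  have h1 := pvA_first lines 0 []
  simp only [List.nil_append] at h1
  rw [h1, hms]
  have h2 := pvA_second (lines.length : Int) (pvMatches lines 0) [] PySem.Dict.empty
  simp only [List.length_nil, Nat.cast_zero, List.nil_append] at h2
  rw [h2]
  rw [pvB_fold lines 0 (PySem.Dict.empty, none)]
  cases hm : pvMatches lines 0 with
  | nil => simp [pvIns]
  | cons m rest =>
    rw [List.foldl_cons,
        show pvCStep (PySem.Dict.empty, none) m = (PySem.Dict.empty, some m) from rfl]
    rcases he : List.foldl pvCStep (PySem.Dict.empty, some m) rest with ⟨d', p'⟩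
    have h := pvB_finish (lines.length : Int) rest PySem.Dict.empty m
    rw [he] at h
    cases p'
    · exact congrArg PySem.Dict.items h.symm
    · exact congrArg PySem.Dict.items h.symm
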